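-- pv_equiv track=rewrite | github.com/toshiishere/network_programming | hw2/client.py | get_piece_cells
-- ===== SOURCE A (Python) =====
-- SHAPES = {
--     0: [],  # Empty
--     1: [(0,1), (1,1), (2,1), (3,1)],  # I
--     2: [(1,1), (2,1), (1,2), (2,2)],  # O
--     3: [(0,1), (1,1), (2,1), (1,2)],  # T
--     4: [(1,1), (2,1), (0,2), (1,2)],  # S
--     5: [(0,1), (1,1), (1,2), (2,2)],  # Z
--     6: [(0,1), (1,1), (2,1), (0,2)],  # J
--     7: [(0,1), (1,1), (2,1), (2,2)],  # L
-- }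
--
-- def rotate_coords(x, y, rot):
--     """Rotate piece coordinates according to rotation (0-3)."""
--     nx, ny = x, y
--     for _ in range(rot % 4):
--         nx, ny = 3 - ny, nx
--     return nx, ny
--
-- def get_piece_cells(piece_id, rot):
--     """Get rotated cell positions for a piece."""
--     if piece_id not in SHAPES or piece_id == 0:
--         return []
--     cells = []
--     for dx, dy in SHAPES[piece_id]:
--         rx, ry = rotate_coords(dx, dy, rot)
--         cells.append((rx, ry))
--     return cells
-- ===== SOURCE B (Python) =====
-- SHAPES = {
--     0: [],  # Empty
--     1: [(0,1), (1,1), (2,1), (3,1)],  # I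
--     2: [(1,1), (2,1), (1,2), (2,2)],  # O
--     3: [(0,1), (1,1), (2,1), (1,2)],  # T
--     4: [(1,1), (2,1), (0,2), (1,2)],  # S
--     5: [(0,1), (1,1), (1,2), (2,2)],  # Z
--     6: [(0,1), (1,1), (2,1), (0,2)],  # J
--     7: [(0,1), (1,1), (2,1), (2,2)],  # L
-- }
--
-- def get_piece_cells(piece_id, rot):
--     """Get rotated cell positions for a piece (closed-form rotation)."""
--     shape = SHAPES.get(piece_id)
--     if not shape:
--         return []
--     r = rot % 4
--     if r == 0:
--         return [(x, y) for x, y in shape]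
--     if r == 1:
--         return [(3 - y, x) for x, y in shape]
--     if r == 2:
--         return [(3 - x, 3 - y) for x, y in shape]
--     return [(y, 3 - x) for x, y in shape]
-- ===== Notes on version B (the rewrite author's own statement) =====
-- stated objective: simpler
-- what changed: Replaces the iterative rotate_coords helper (applying (nx,ny)=(3-ny,nx) rot%4 times per cell) with a closed-form rotation chosen once by r = rot % 4 and applied to the whole shape by a comprehension.
import Mathlib
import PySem

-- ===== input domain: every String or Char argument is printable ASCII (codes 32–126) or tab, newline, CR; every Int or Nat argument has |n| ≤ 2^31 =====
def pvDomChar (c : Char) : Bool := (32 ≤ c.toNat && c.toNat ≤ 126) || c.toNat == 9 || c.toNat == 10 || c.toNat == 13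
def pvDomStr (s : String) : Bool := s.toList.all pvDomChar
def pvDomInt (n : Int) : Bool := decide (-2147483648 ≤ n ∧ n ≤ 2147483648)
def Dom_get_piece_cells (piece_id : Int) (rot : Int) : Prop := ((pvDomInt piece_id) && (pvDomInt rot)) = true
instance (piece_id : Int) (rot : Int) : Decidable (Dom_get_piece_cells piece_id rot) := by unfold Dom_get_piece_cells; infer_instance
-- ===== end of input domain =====

-- B replaces the per-cell iterative rotation with a closed form selected once by rot % 4 (simpler).

-- module-level constant SHAPES, shared by both programs
def pvSHAPES : PySem.Dict Int (List (Int × Int)) := PySem.Dict.mk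
  [ (0, []),
    (1, [(0,1), (1,1), (2,1), (3,1)]),
    (2, [(1,1), (2,1), (1,2), (2,2)]),
    (3, [(0,1), (1,1), (2,1), (1,2)]),
    (4, [(1,1), (2,1), (0,2), (1,2)]),
    (5, [(0,1), (1,1), (1,2), (2,2)]),
    (6, [(0,1), (1,1), (2,1), (0,2)]),
    (7, [(0,1), (1,1), (2,1), (2,2)]) ]

-- ===== PORT A =====
def rotate_coords (x : Int) (y : Int) (rot : Int) : Int × Int :=
  (PySem.List.pyRange 0 (PySem.Int.mod rot 4) 1).foldl
    (fun (p : Int × Int) _ => (3 - p.2, p.1)) (x, y)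

def get_piece_cells (piece_id : Int) (rot : Int) : List (Int × Int) :=
  if ¬ (pvSHAPES.contains piece_id) ∨ piece_id = 0 then []
  else
    (pvSHAPES.getD piece_id []).foldl
      (fun cells d => cells ++ [rotate_coords d.1 d.2 rot]) []

-- ===== PORT B =====
def get_piece_cells_alt (piece_id : Int) (rot : Int) : List (Int × Int) :=
  match pvSHAPES.get? piece_id with
  | none => []
  | some shape =>
    if shape = [] then []
    else
      let r := PySem.Int.mod rot 4
      if r = 0 then shape.map (fun p => (p.1, p.2))
      else if r = 1 then shape.map (fun p => (3 - p.2, p.1))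
      else if r = 2 then shape.map (fun p => (3 - p.1, 3 - p.2))
      else shape.map (fun p => (p.2, 3 - p.1))

-- ===== PRECONDITION & SPEC =====
def Spec_get_piece_cells (piece_id : Int) (rot : Int) (out : List (Int × Int)) : Prop := out = get_piece_cells_alt piece_id rot
instance (piece_id : Int) (rot : Int) (out : List (Int × Int)) : Decidable (Spec_get_piece_cells piece_id rot out) := by unfold Spec_get_piece_cells; infer_instance

-- ===== CLAIM (what is proved, stated in full; the proofs are below) =====
def Claim_equal_get_piece_cells : Prop := ∀ (piece_id : Int) (rot : Int), Dom_get_piece_cells piece_id rot → Spec_get_piece_cells piece_id rot (get_piece_cells piece_id rot)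

-- ===== LEMMAS AND PROOFS =====

-- rot % 4 is one of 0,1,2,3
theorem pv_mod4_cases (rot : Int) :
    PySem.Int.mod rot 4 = 0 ∨ PySem.Int.mod rot 4 = 1 ∨
    PySem.Int.mod rot 4 = 2 ∨ PySem.Int.mod rot 4 = 3 := by
  have h0 := PySem.Int.mod_nonneg rot (b := 4) (by norm_num)
  have h1 := PySem.Int.mod_lt rot (b := 4) (by norm_num)
  omega

-- the iterative rotation equals the closed form selected by the residue of rot
theorem rotate_closed (x y rot : Int) :
    rotate_coords x y rot =
      (if PySem.Int.mod rot 4 = 0 then (x, y)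
       else if PySem.Int.mod rot 4 = 1 then (3 - y, x)
       else if PySem.Int.mod rot 4 = 2 then (3 - x, 3 - y)
       else (y, 3 - x)) := by
  rcases pv_mod4_cases rot with hr | hr | hr | hr <;>
    · unfold rotate_coords
      rw [hr]
      simp [PySem.List.pyRange_one_eq_nil, PySem.List.pyRange_one_cons, List.foldl]

-- for piece ids outside the table both programs return []
theorem pv_absent (piece_id rot : Int)
    (h0 : piece_id ≠ 0) (h1 : piece_id ≠ 1) (h2 : piece_id ≠ 2) (h3 : piece_id ≠ 3)
    (h4 : piece_id ≠ 4) (h5 : piece_id ≠ 5) (h6 : piece_id ≠ 6) (h7 : piece_id ≠ 7) :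
    get_piece_cells piece_id rot = [] ∧ get_piece_cells_alt piece_id rot = [] := by
  have hc : pvSHAPES.get? piece_id = none := by
    simp [pvSHAPES, PySem.Dict.get?, Ne.symm h0, Ne.symm h1, Ne.symm h2, Ne.symm h3,
          Ne.symm h4, Ne.symm h5, Ne.symm h6, Ne.symm h7]
  refine ⟨?_, ?_⟩
  · have hco : pvSHAPES.contains piece_id = false := by
      simpa [PySem.Dict.contains_eq_isSome_get?] using congrArg Option.isSome hc
    simp [get_piece_cells, hco]
  · simp [get_piece_cells_alt, hc]

-- on a concrete piece id both sides reduce once the residue of rot is fixed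
theorem pv_concrete (piece_id rot : Int)
    (h : piece_id = 1 ∨ piece_id = 2 ∨ piece_id = 3 ∨ piece_id = 4 ∨
         piece_id = 5 ∨ piece_id = 6 ∨ piece_id = 7) :
    get_piece_cells piece_id rot = get_piece_cells_alt piece_id rot := by
  rcases pv_mod4_cases rot with hr | hr | hr | hr <;>
  (have he := ((PySem.Int.mod_eq_emod_of_pos (a := rot) (b := 4) (by norm_num)).symm).trans hr) <;>
  rcases h with h | h | h | h | h | h | h <;> subst h <;>
  simp [get_piece_cells, get_piece_cells_alt, pvSHAPES, rotate_closed, hr, he,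
        Int.dvd_iff_emod_eq_zero, PySem.Dict.contains, PySem.Dict.get?, PySem.Dict.getD]

-- ===== VERDICT (by name: the statement is the Claim_ definition above) =====
theorem get_piece_cells_spec : Claim_equal_get_piece_cells := by
  intro piece_id rot _
  unfold Spec_get_piece_cells
  by_cases h0 : piece_id = 0
  · subst h0
    simp [get_piece_cells, get_piece_cells_alt, pvSHAPES, PySem.Dict.get?]
  by_cases h : piece_id = 1 ∨ piece_id = 2 ∨ piece_id = 3 ∨ piece_id = 4 ∨
      piece_id = 5 ∨ piece_id = 6 ∨ piece_id = 7
  · exact pv_concrete piece_id rot h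
  · simp only [not_or] at h
    obtain ⟨h1, h2, h3, h4, h5, h6, h7⟩ := h
    obtain ⟨ha, hb⟩ := pv_absent piece_id rot h0 h1 h2 h3 h4 h5 h6 h7
    rw [ha, hb]
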